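-- pv_equiv track=rewrite | github.com/zmalkmus/CS581-PA1 | sort.py | gulag_median
-- ===== SOURCE A (Python) =====
-- def gulag_median(arr):
--     # Remove the largest and smallest elements from the array until one element remains.
--     copy = arr.copy()
--     while len(copy) > 1:
--         largest = copy[0]
--         largest_index = 0
--         for i in range(len(copy)):
--             if copy[i] > largest:
--                 largest = copy[i]
--                 largest_index = i
--         copy.pop(largest_index)
--
--         if len(copy) == 1:
--             break
--
--         smallest = copy[0]
--         smallest_index = 0
--         for i in range(len(copy)):
--             if copy[i] < smallest:
--                 smallest = copy[i]
--                 smallest_index = i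
--         copy.pop(smallest_index)
--     return copy[0]
-- ===== SOURCE B (Python) =====
-- def gulag_median(arr):
--     # Sort once and take the lower median (rank (len-1)//2).
--     return sorted(arr)[(len(arr) - 1) // 2]
-- ===== Notes on version B (the rewrite author's own statement) =====
-- stated objective: faster
-- what changed: Replaced the quadratic loop that alternately scans for and pops the maximum and minimum until one element remains by a single sort followed by indexing the lower-median rank (len(arr)-1)//2.
import Mathlib
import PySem

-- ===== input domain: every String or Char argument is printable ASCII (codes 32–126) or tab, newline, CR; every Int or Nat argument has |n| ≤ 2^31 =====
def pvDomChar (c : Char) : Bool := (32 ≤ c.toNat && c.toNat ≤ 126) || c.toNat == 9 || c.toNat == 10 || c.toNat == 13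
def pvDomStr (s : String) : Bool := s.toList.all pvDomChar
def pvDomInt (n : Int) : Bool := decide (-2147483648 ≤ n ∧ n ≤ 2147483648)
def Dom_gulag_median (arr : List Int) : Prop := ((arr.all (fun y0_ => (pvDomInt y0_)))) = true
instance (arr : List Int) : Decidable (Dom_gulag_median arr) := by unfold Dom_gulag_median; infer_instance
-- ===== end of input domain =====

-- B replaces A's quadratic alternate-pop-max/min loop by sort once + index the lower-median rank (faster).

-- ===== PORT A =====
-- the 'for i in range(len(copy))' scan keeping the running largest and its index
def pyArgMax (copy : List Int) : Int × Int :=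
  (PySem.List.pyRange 0 (copy.length : Int) 1).foldl
    (fun st i =>
      if PySem.List.pyGetD copy i 0 > st.1 then (PySem.List.pyGetD copy i 0, i) else st)
    (PySem.List.pyGetD copy 0 0, 0)

-- the mirror scan keeping the running smallest and its index
def pyArgMin (copy : List Int) : Int × Int :=
  (PySem.List.pyRange 0 (copy.length : Int) 1).foldl
    (fun st i =>
      if PySem.List.pyGetD copy i 0 < st.1 then (PySem.List.pyGetD copy i 0, i) else st)
    (PySem.List.pyGetD copy 0 0, 0)

-- the while loop; fuel only makes it total (arr.length iterations always suffice);
-- the 'none' branches of pop? are unreachable (the computed index is in range)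
def gulagLoopFuel : Nat → List Int → List Int
  | 0, copy => copy
  | fuel+1, copy =>
    if 1 < copy.length then
      match PySem.List.pop? copy (pyArgMax copy).2 with
      | none => copy
      | some r =>
        if r.2.length = 1 then r.2
        else
          match PySem.List.pop? r.2 (pyArgMin r.2).2 with
          | none => r.2
          | some r2 => gulagLoopFuel fuel r2.2
    else copy

-- final 'return copy[0]'; default 0 is unreachable under Pre_ (arr ≠ [] keeps the list nonempty)
def gulag_median (arr : List Int) : Int :=
  PySem.List.pyGetD (gulagLoopFuel arr.length arr) 0 0

-- ===== PORT B =====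
def gulag_median_alt (arr : List Int) : Int :=
  PySem.List.pyGetD (PySem.List.sorted arr (fun x => x) false)
    (PySem.Int.floordiv ((arr.length : Int) - 1) 2) 0

-- ===== PRECONDITION & SPEC =====
-- Pre_ excludes only the empty list, on which both Pythons raise IndexError.
def Pre_gulag_median (arr : List Int) : Prop := arr ≠ []
instance (arr : List Int) : Decidable (Pre_gulag_median arr) := by unfold Pre_gulag_median; infer_instance
def pvWitness_gulag_median : List Int := ([3, 1, 2])

def Spec_gulag_median (arr : List Int) (out : Int) : Prop := out = gulag_median_alt arr
instance (arr : List Int) (out : Int) : Decidable (Spec_gulag_median arr out) := by unfold Spec_gulag_median; infer_instance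

-- ===== CLAIM (what is proved, stated in full; the proofs are below) =====
def Claim_equal_gulag_median : Prop := ∀ (arr : List Int), Dom_gulag_median arr → Pre_gulag_median arr → Spec_gulag_median arr (gulag_median arr)

-- ===== LEMMAS AND PROOFS =====


theorem pvExistsSingleton (l : List Int) (hne : l ≠ []) (h : l.length ≤ 1) : ∃ a, l = [a] := by
  match l with
  | [] => exact absurd rfl hne
  | [a] => exact ⟨a, rfl⟩
  | a::b::t => simp at h

-- a length-1 list is the singleton of its getD 0
theorem pvSingleton_of_length_one (xs : List Int) (h : xs.length = 1) : xs = [xs.getD 0 0] := by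
  match xs, h with
  | [a], _ => rfl

theorem pvSorted_singleton (a : Int) : PySem.List.sorted [a] (fun x => x) false = [a] :=
  PySem.List.sorted_id_eq_of_perm_of_pairwise _ _ (List.Perm.refl _) (List.pairwise_singleton _ _)

-- the argmax fold invariant: after scanning the first n indices the state is
-- (value at j, j) for the FIRST index j of the maximum of the prefix
theorem pvArgmaxFold (l : List Int) (n : Nat) (hn : 1 <= n) (hle : n <= l.length) :
    ∃ j : Nat, j < n ∧
      (List.range n).foldl (fun (st : Int × Int) (k : Nat) =>
          if l.getD k 0 > st.1 then (l.getD k 0, (k : Int)) else st) (l.getD 0 0, 0)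
        = (l.getD j 0, (j : Int)) ∧
      (∀ i, i < n → l.getD i 0 ≤ l.getD j 0) ∧ (∀ i, i < j → l.getD i 0 < l.getD j 0) := by
  induction n with
  | zero => omega
  | succ n IH =>
    rcases Nat.lt_or_ge 1 (n+1) with h1 | h1
    · have hn' : 1 ≤ n := by omega
      obtain ⟨j, hj, heq, hmax, hfirst⟩ := IH hn' (by omega)
      rw [List.range_succ, List.foldl_append, heq]
      simp only [List.foldl_cons, List.foldl_nil]
      by_cases hc : l.getD n 0 > l.getD j 0
      · rw [if_pos hc]
        refine ⟨n, by omega, rfl, ?_, ?_⟩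
        · intro i hi
          rcases Nat.lt_or_ge i n with h | h
          · exact le_of_lt (lt_of_le_of_lt (hmax i h) hc)
          · have : i = n := by omega
            subst this; exact le_refl _
        · intro i hi; exact lt_of_le_of_lt (hmax i hi) hc
      · rw [if_neg hc]
        refine ⟨j, by omega, rfl, ?_, hfirst⟩
        intro i hi
        rcases Nat.lt_or_ge i n with h | h
        · exact hmax i h
        · have : i = n := by omega
          subst this; omega
    · have : n = 0 := by omega
      subst this
      refine ⟨0, by omega, ?_, ?_, ?_⟩
      · simp
      · intro i hi
        have : i = 0 := by omega
        subst this; exact le_refl _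
      · intro i hi; omega

-- the mirror invariant for the argmin scan
theorem pvArgminFold (l : List Int) (n : Nat) (hn : 1 <= n) (hle : n <= l.length) :
    ∃ j : Nat, j < n ∧
      (List.range n).foldl (fun (st : Int × Int) (k : Nat) =>
          if l.getD k 0 < st.1 then (l.getD k 0, (k : Int)) else st) (l.getD 0 0, 0)
        = (l.getD j 0, (j : Int)) ∧
      (∀ i, i < n → l.getD j 0 ≤ l.getD i 0) ∧ (∀ i, i < j → l.getD j 0 < l.getD i 0) := by
  induction n with
  | zero => omega
  | succ n IH =>
    rcases Nat.lt_or_ge 1 (n+1) with h1 | h1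
    · have hn' : 1 ≤ n := by omega
      obtain ⟨j, hj, heq, hmin, hfirst⟩ := IH hn' (by omega)
      rw [List.range_succ, List.foldl_append, heq]
      simp only [List.foldl_cons, List.foldl_nil]
      by_cases hc : l.getD n 0 < l.getD j 0
      · rw [if_pos hc]
        refine ⟨n, by omega, rfl, ?_, ?_⟩
        · intro i hi
          rcases Nat.lt_or_ge i n with h | h
          · exact le_of_lt (lt_of_lt_of_le hc (hmin i h))
          · have : i = n := by omega
            subst this; exact le_refl _
        · intro i hi; exact lt_of_lt_of_le hc (hmin i hi)
      · rw [if_neg hc]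
        refine ⟨j, by omega, rfl, ?_, hfirst⟩
        intro i hi
        rcases Nat.lt_or_ge i n with h | h
        · exact hmin i h
        · have : i = n := by omega
          subst this; omega
    · have : n = 0 := by omega
      subst this
      refine ⟨0, by omega, ?_, ?_, ?_⟩
      · simp
      · intro i hi
        have : i = 0 := by omega
        subst this; exact le_refl _
      · intro i hi; omega

theorem pvArgMax_eq (l : List Int) :
    pyArgMax l = (List.range l.length).foldl (fun (st : Int × Int) (k : Nat) =>
        if l.getD k 0 > st.1 then (l.getD k 0, (k : Int)) else st) (l.getD 0 0, 0) := by
  unfold pyArgMax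
  rw [PySem.List.pyRange_zero_nat, List.foldl_map]
  simp only [PySem.List.pyGetD_natCast, PySem.List.pyGetD_ofNat']

theorem pvArgMin_eq (l : List Int) :
    pyArgMin l = (List.range l.length).foldl (fun (st : Int × Int) (k : Nat) =>
        if l.getD k 0 < st.1 then (l.getD k 0, (k : Int)) else st) (l.getD 0 0, 0) := by
  unfold pyArgMin
  rw [PySem.List.pyRange_zero_nat, List.foldl_map]
  simp only [PySem.List.pyGetD_natCast, PySem.List.pyGetD_ofNat']

-- popping at the first index of a value removes exactly its first occurrence
theorem pvEraseIdx_eq_erase (l : List Int) (j : Nat) (hj : j < l.length)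
    (hfirst : ∀ i, i < j → l.getD i 0 ≠ l.getD j 0) : l.eraseIdx j = l.erase (l.getD j 0) := by
  induction l generalizing j with
  | nil => simp at hj
  | cons a t IH =>
    cases j with
    | zero => simp [List.getD]
    | succ j =>
      have ha : a ≠ (a :: t).getD (j+1) 0 := hfirst 0 (by omega)
      have hgd : (a :: t).getD (j+1) 0 = t.getD j 0 := by simp [List.getD]
      rw [hgd] at ha
      rw [List.eraseIdx_cons_succ]
      have hgd2 : (a :: t).getD (j+1) 0 = t.getD j 0 := hgd
      simp only [hgd2]
      rw [List.erase_cons_tail (by simpa using ha)]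
      congr 1
      refine IH j (by simpa using hj) ?_
      intro i hi
      have := hfirst (i+1) (by omega)
      simpa [List.getD] using this

theorem pvPopArgmax (l : List Int) (h : 1 ≤ l.length) :
    ∃ M : Int, M ∈ l ∧ (∀ y ∈ l, y ≤ M) ∧
      PySem.List.pop? l (pyArgMax l).2 = some ((pyArgMax l).1, l.erase M) := by
  obtain ⟨j, hj, heq, hmax, hfirst⟩ := pvArgmaxFold l l.length h le_rfl
  refine ⟨l.getD j 0, ?_, ?_, ?_⟩
  · rw [List.getD_eq_getElem l 0 hj]; exact List.getElem_mem hj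
  · intro y hy
    obtain ⟨i, hi, rfl⟩ := List.mem_iff_getElem.mp hy
    rw [← List.getD_eq_getElem l 0 hi]
    exact hmax i hi
  · rw [pvArgMax_eq, heq]
    simp only
    rw [PySem.List.pop?_natCast l j hj]
    rw [pvEraseIdx_eq_erase l j hj (fun i hi => ne_of_lt (hfirst i hi))]
    rw [List.getD_eq_getElem l 0 hj]

theorem pvPopArgmin (l : List Int) (h : 1 ≤ l.length) :
    ∃ m : Int, m ∈ l ∧ (∀ y ∈ l, m ≤ y) ∧
      PySem.List.pop? l (pyArgMin l).2 = some ((pyArgMin l).1, l.erase m) := by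
  obtain ⟨j, hj, heq, hmin, hfirst⟩ := pvArgminFold l l.length h le_rfl
  refine ⟨l.getD j 0, ?_, ?_, ?_⟩
  · rw [List.getD_eq_getElem l 0 hj]; exact List.getElem_mem hj
  · intro y hy
    obtain ⟨i, hi, rfl⟩ := List.mem_iff_getElem.mp hy
    rw [← List.getD_eq_getElem l 0 hi]
    exact hmin i hi
  · rw [pvArgMin_eq, heq]
    simp only
    rw [PySem.List.pop?_natCast l j hj]
    rw [pvEraseIdx_eq_erase l j hj (fun i hi => (ne_of_lt (hfirst i hi)).symm)]
    rw [List.getD_eq_getElem l 0 hj]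

-- erasing one maximum drops the last element of the sorted list
theorem pvSortedEraseMax (l : List Int) (M : Int) (hM : M ∈ l) (hmax : ∀ y ∈ l, y ≤ M) :
    PySem.List.sorted (l.erase M) (fun x => x) false
      = (PySem.List.sorted l (fun x => x) false).dropLast := by
  have hperm : (PySem.List.sorted l (fun x => x) false).Perm l := PySem.List.sorted_perm l _ false
  have hpw : (PySem.List.sorted l (fun x => x) false).Pairwise (· ≤ ·) :=
    PySem.List.sorted_pairwise l (fun x => x)
  have hlne : l ≠ [] := List.ne_nil_of_mem hM
  have hne : PySem.List.sorted l (fun x => x) false ≠ [] := by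
    intro hc; exact hlne ((PySem.List.sorted_eq_nil_iff l _ false).mp hc)
  set s := PySem.List.sorted l (fun x => x) false with hs
  have hsplit : s.dropLast ++ [s.getLast hne] = s := List.dropLast_append_getLast hne
  have hLl : s.getLast hne ∈ l := hperm.mem_iff.mp (List.getLast_mem hne)
  have hLM : s.getLast hne ≤ M := hmax _ hLl
  have hML : M ≤ s.getLast hne := by
    have hMs : M ∈ s := hperm.mem_iff.mpr hM
    rw [← hsplit] at hMs
    rcases List.mem_append.mp hMs with hmem | hmem
    · have hpw' := hpw
      rw [← hsplit] at hpw'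
      exact (List.pairwise_append.mp hpw').2.2 M hmem _ (List.mem_singleton_self _)
    · simp only [List.mem_singleton] at hmem
      exact le_of_eq hmem
  have hLM' : s.getLast hne = M := le_antisymm hLM hML
  have h1 : (s.erase M).Perm (l.erase M) := hperm.erase M
  have h2 : (s.erase M).Perm s.dropLast := by
    have e1 : s.erase M = (s.dropLast ++ [M]).erase M := by rw [← hLM', hsplit]
    rw [e1]
    have := (List.perm_append_singleton M s.dropLast).erase M
    rw [List.erase_cons_head] at this
    exact this
  have hpw2 : s.dropLast.Pairwise (· ≤ ·) := List.Pairwise.sublist (List.dropLast_sublist s) hpw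
  exact PySem.List.sorted_id_eq_of_perm_of_pairwise _ _ (h2.symm.trans h1) hpw2

-- erasing one minimum drops the head of the sorted list
theorem pvSortedEraseMin (l : List Int) (m : Int) (hm : m ∈ l) (hmin : ∀ y ∈ l, m ≤ y) :
    PySem.List.sorted (l.erase m) (fun x => x) false
      = (PySem.List.sorted l (fun x => x) false).tail := by
  have hperm : (PySem.List.sorted l (fun x => x) false).Perm l := PySem.List.sorted_perm l _ false
  have hpw : (PySem.List.sorted l (fun x => x) false).Pairwise (· ≤ ·) :=
    PySem.List.sorted_pairwise l (fun x => x)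
  have hlne : l ≠ [] := List.ne_nil_of_mem hm
  have hne : PySem.List.sorted l (fun x => x) false ≠ [] := by
    intro hc; exact hlne ((PySem.List.sorted_eq_nil_iff l _ false).mp hc)
  set s := PySem.List.sorted l (fun x => x) false with hs
  have hsplit : s.head hne :: s.tail = s := List.cons_head_tail hne
  have hHl : s.head hne ∈ l := hperm.mem_iff.mp (List.head_mem hne)
  have hmH : m ≤ s.head hne := hmin _ hHl
  have hHm : s.head hne ≤ m := by
    have hms : m ∈ s := hperm.mem_iff.mpr hm
    rw [← hsplit] at hms
    rcases List.mem_cons.mp hms with hmem | hmem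
    · exact le_of_eq hmem.symm
    · have hpw' := hpw
      rw [← hsplit] at hpw'
      exact (List.pairwise_cons.mp hpw').1 m hmem
  have hHm' : s.head hne = m := le_antisymm hHm hmH
  have h1 : (s.erase m).Perm (l.erase m) := hperm.erase m
  have h2 : s.erase m = s.tail := by
    conv_lhs => rw [← hsplit, hHm']
    exact List.erase_cons_head m s.tail
  have hpw2 : s.tail.Pairwise (· ≤ ·) := List.Pairwise.sublist (List.tail_sublist s) hpw
  exact PySem.List.sorted_id_eq_of_perm_of_pairwise _ _ (h2 ▸ h1) hpw2

-- the loop computes the lower-median element of the sorted list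
theorem pvLoopSpec : ∀ (fuel : Nat) (l : List Int), l ≠ [] → l.length ≤ 2*fuel + 1 →
    gulagLoopFuel fuel l
      = [(PySem.List.sorted l (fun x => x) false).getD ((l.length - 1)/2) 0] := by
  intro fuel
  induction fuel with
  | zero =>
    intro l hne hlen
    obtain ⟨a, rfl⟩ : ∃ a, l = [a] := pvExistsSingleton l hne (by omega)
    simp [gulagLoopFuel, pvSorted_singleton]
  | succ fuel IH =>
    intro l hne hlen
    by_cases hlen1 : 1 < l.length
    · obtain ⟨M, hMmem, hMmax, hpop⟩ := pvPopArgmax l (by omega)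
      have hsE := pvSortedEraseMax l M hMmem hMmax
      have hlenc1 : (l.erase M).length = l.length - 1 := List.length_erase_of_mem hMmem
      have hslen : (PySem.List.sorted l (fun x => x) false).length = l.length :=
        PySem.List.length_sorted l _ false
      simp only [gulagLoopFuel, if_pos hlen1, hpop]
      by_cases h2 : l.length = 2
      · rw [if_pos (by omega)]
        have hc1s : PySem.List.sorted (l.erase M) (fun x => x) false = l.erase M := by
          rw [pvSingleton_of_length_one (l.erase M) (by omega)]
          rw [pvSorted_singleton]
        have he : l.erase M = (PySem.List.sorted l (fun x => x) false).dropLast := by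
          rw [← hc1s, hsE]
        rw [he]
        rw [pvSingleton_of_length_one ((PySem.List.sorted l (fun x => x) false).dropLast)
          (by rw [List.length_dropLast]; omega)]
        have hb : 0 < (PySem.List.sorted l (fun x => x) false).dropLast.length := by
          rw [List.length_dropLast]; omega
        have hb2 : 0 < (PySem.List.sorted l (fun x => x) false).length := by omega
        rw [List.getD_eq_getElem _ 0 hb, List.getElem_dropLast,
          ← List.getD_eq_getElem _ 0 hb2]
        have : (l.length - 1)/2 = 0 := by omega
        rw [this]
      · rw [if_neg (by omega)]
        have hc1ne : l.erase M ≠ [] := by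
          intro hc; rw [hc] at hlenc1; simp at hlenc1; omega
        obtain ⟨m, hmmem, hmmin, hpop2⟩ := pvPopArgmin (l.erase M) (by omega)
        have hsE2 := pvSortedEraseMin (l.erase M) m hmmem hmmin
        have hlenc2 : ((l.erase M).erase m).length = l.length - 2 := by
          rw [List.length_erase_of_mem hmmem]; omega
        simp only [hpop2]
        rw [IH ((l.erase M).erase m)
          (by intro hc; rw [hc] at hlenc2; simp at hlenc2; omega) (by omega)]
        rw [hsE2, hsE, hlenc2]
        congr 1
        have hb1 : (l.length - 2 - 1)/2 < (PySem.List.sorted l (fun x => x) false).dropLast.tail.length := by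
          rw [List.length_tail, List.length_dropLast]; omega
        have hb2 : (l.length - 2 - 1)/2 + 1 < (PySem.List.sorted l (fun x => x) false).dropLast.length := by
          rw [List.length_dropLast]; omega
        have hb3 : (l.length - 2 - 1)/2 + 1 < (PySem.List.sorted l (fun x => x) false).length := by omega
        rw [List.getD_eq_getElem _ 0 hb1, List.getElem_tail, List.getElem_dropLast,
          ← List.getD_eq_getElem _ 0 hb3]
        congr 1
        omega
    · obtain ⟨a, rfl⟩ : ∃ a, l = [a] := pvExistsSingleton l hne (by omega)
      simp [gulagLoopFuel, pvSorted_singleton]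


-- ===== VERDICT (by name: the statement is the Claim_ definition above) =====
theorem gulag_median_spec : Claim_equal_gulag_median := by
  intro arr _ hpre
  unfold Spec_gulag_median gulag_median gulag_median_alt
  have hlen : 1 ≤ arr.length := List.length_pos_of_ne_nil hpre
  rw [pvLoopSpec arr.length arr hpre (by omega)]
  rw [PySem.List.pyGetD_ofNat']
  simp only [List.getD_cons_zero]
  have hc : ((arr.length : Int) - 1) = ((arr.length - 1 : Nat) : Int) := by omega
  rw [hc]
  have h2 : (2 : Int) = ((2 : Nat) : Int) := rfl
  rw [h2, PySem.Int.floordiv_natCast, PySem.List.pyGetD_natCast]
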